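-- pv_equiv track=rewrite | github.com/kulakaka/NUSCS | CS1010E/PE2_PastYearPapar/2223Sem1/part3.py | min_no_of_turns
-- ===== SOURCE A (Python) =====
-- def min_no_of_turns(L):
--     lis = list(L)
--
--     count=0
--     minu = min(lis)
--     while len(lis)!=0:
--
--         if minu+1 in lis:
--             lis.remove(minu)
--             minu=minu+1
--
--         else:
--             if minu != min(lis):
--                     count+=1
--                     lis.remove(minu)
--                     minu = min(lis)
--             else:
--                 count+=1
--                 lis.remove(minu)
--                 if not lis:
--                      return count
--                 minu = min(lis)
--
--     return count
-- ===== SOURCE B (Python) =====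
-- def min_no_of_turns(L):
--     freq = {}
--     for x in L:
--         freq[x] = freq.get(x, 0) + 1
--     return sum(max(0, v - freq.get(k - 1, 0)) for k, v in freq.items())
-- ===== Notes on version B (the rewrite author's own statement) =====
-- stated objective: faster
-- what changed: Replaces the quadratic greedy simulation (repeated min/membership/remove on a shrinking list) by a one-pass frequency dictionary and the closed form sum over values v of max(0, freq[v] - freq[v-1]), the number of consecutive chains that must start at v.
import Mathlib
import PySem

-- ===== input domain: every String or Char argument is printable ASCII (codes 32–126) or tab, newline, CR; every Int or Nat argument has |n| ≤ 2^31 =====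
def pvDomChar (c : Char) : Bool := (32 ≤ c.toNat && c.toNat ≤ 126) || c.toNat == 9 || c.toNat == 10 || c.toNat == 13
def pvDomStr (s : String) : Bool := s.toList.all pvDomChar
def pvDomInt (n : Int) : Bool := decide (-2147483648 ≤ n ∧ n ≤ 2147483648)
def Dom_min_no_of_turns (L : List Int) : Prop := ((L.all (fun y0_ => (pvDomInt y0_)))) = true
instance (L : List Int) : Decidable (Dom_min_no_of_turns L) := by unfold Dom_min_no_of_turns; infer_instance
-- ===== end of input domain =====

-- B replaces A's quadratic greedy chain simulation by a one-pass frequency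
-- dictionary and the closed form sum over v of max(0, freq v - freq (v-1)) (measured faster).


-- ===== PORT A =====
-- termination helper for the while loop (each iteration removes one element)
theorem pvRemoveLen {xs l' : List Int} {v : Int} (h : PySem.List.remove? xs v = some l') :
    l'.length < xs.length := by
  by_cases hv : v ∈ xs
  · rw [PySem.List.remove?_eq_some_erase xs v hv] at h
    cases h
    have h1 : (xs.erase v).length = xs.length - 1 := List.length_erase_of_mem hv
    have h2 : 0 < xs.length := List.length_pos_of_mem hv
    omega
  · rw [(PySem.List.remove?_eq_none_iff xs v).mpr hv] at h; cases h

-- the while loop of A: state (lis, count, minu); none = a Python exception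
def pvGoA (lis : List Int) (count : Int) (minu : Int) : Option Int :=
  if lis = [] then some count
  else if (minu + 1) ∈ lis then
    match hrm : PySem.List.remove? lis minu with
    | none => none
    | some l' => pvGoA l' count (minu + 1)
  else
    match PySem.List.min? lis (fun y => y) with
    | none => none
    | some mn =>
      if minu ≠ mn then
        match hrm : PySem.List.remove? lis minu with
        | none => none
        | some l' =>
          match PySem.List.min? l' (fun y => y) with
          | none => none
          | some mn' => pvGoA l' (count + 1) mn'
      else
        match hrm : PySem.List.remove? lis minu with
        | none => none
        | some l' =>
          if l' = [] then some (count + 1)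
          else
            match PySem.List.min? l' (fun y => y) with
            | none => none
            | some mn' => pvGoA l' (count + 1) mn'
termination_by lis.length
decreasing_by
  · exact pvRemoveLen hrm
  · exact pvRemoveLen hrm
  · exact pvRemoveLen hrm

def min_no_of_turns (L : List Int) : Int :=
  match PySem.List.min? L (fun y => y) with
  | none => 0        -- Python: ValueError on the empty list; excluded by Pre_
  | some m => (pvGoA L 0 m).getD 0   -- getD: the loop itself never raises (proved below)

-- ===== PORT B =====
def min_no_of_turns_alt (L : List Int) : Int :=
  let freq := L.foldl (fun d x => d.modify x 0 (· + 1)) PySem.Dict.empty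
  (freq.items.map (fun p => max 0 (p.2 - freq.getD (p.1 - 1) 0))).sum

-- ===== PRECONDITION & SPEC =====
-- Pre_ excludes only the empty list, on which A raises ValueError (min of empty sequence).
def Pre_min_no_of_turns (L : List Int) : Prop := L ≠ []
instance (L : List Int) : Decidable (Pre_min_no_of_turns L) := by unfold Pre_min_no_of_turns; infer_instance
def pvWitness_min_no_of_turns : List Int := [3, 1, 2, 1]


def Spec_min_no_of_turns (L : List Int) (out : Int) : Prop := out = min_no_of_turns_alt L
instance (L : List Int) (out : Int) : Decidable (Spec_min_no_of_turns L out) := by unfold Spec_min_no_of_turns; infer_instance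

-- ===== CLAIM (what is proved, stated in full; the proofs are below) =====
def Claim_equal_min_no_of_turns : Prop := ∀ (L : List Int), Dom_min_no_of_turns L → Pre_min_no_of_turns L → Spec_min_no_of_turns L (min_no_of_turns L)

-- ===== LEMMAS AND PROOFS =====

-- multiplicity of v in l, as an Int
def pvCnt (l : List Int) (v : Int) : Int := (l.count v : Int)
-- one summand of B's closed form
def pvTerm (l : List Int) (v : Int) : Int := max 0 (pvCnt l v - pvCnt l (v - 1))
-- the summand adjusted for an open chain currently ending at u
def pvTermU (l : List Int) (u v : Int) : Int :=
  if v = u then 1 + max 0 (pvCnt l u - 1 - pvCnt l (u - 1)) else pvTerm l v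

theorem pvCnt_nonneg (l : List Int) (v : Int) : 0 ≤ pvCnt l v := by
  simp [pvCnt]

theorem pvCnt_pos_of_mem {l : List Int} {v : Int} (h : v ∈ l) : 1 ≤ pvCnt l v := by
  have := List.count_pos_iff.mpr h
  unfold pvCnt; exact_mod_cast this

theorem pvCnt_eq_zero_of_not_mem {l : List Int} {v : Int} (h : v ∉ l) : pvCnt l v = 0 := by
  unfold pvCnt
  simp [List.count_eq_zero.mpr h]

theorem pvCnt_erase {l : List Int} {u : Int} (hu : u ∈ l) (v : Int) :
    pvCnt (l.erase u) v = if v = u then pvCnt l v - 1 else pvCnt l v := by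
  have hc := List.count_pos_iff.mpr hu
  unfold pvCnt
  split_ifs with h
  · subst h; rw [List.count_erase_self]; omega
  · rw [List.count_erase_of_ne h]

-- chain step: removing the current element and moving the open end from u to u+1 keeps the sum
theorem pvStep1 (S : Finset Int) (l : List Int) (u : Int) (hu : u ∈ l)
    (hS : u ∈ S) (hS1 : u + 1 ∈ S) :
    (∑ v ∈ S, pvTermU l u v) = ∑ v ∈ S, pvTermU (l.erase u) (u + 1) v := by
  have hne : u ≠ u + 1 := by omega
  have c1 : pvCnt (l.erase u) u = pvCnt l u - 1 := by
    rw [pvCnt_erase hu u, if_pos rfl]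
  have c2 : pvCnt (l.erase u) (u + 1) = pvCnt l (u + 1) := by
    rw [pvCnt_erase hu (u + 1), if_neg (by omega : u + 1 ≠ u)]
  have c3 : pvCnt (l.erase u) (u - 1) = pvCnt l (u - 1) := by
    rw [pvCnt_erase hu (u - 1), if_neg (by omega : u - 1 ≠ u)]
  have hsub : ({u, u + 1} : Finset Int) ⊆ S := by
    simp [Finset.insert_subset_iff, hS, hS1]
  rw [← Finset.sum_sdiff hsub, ← Finset.sum_sdiff hsub]
  have hdiff : (∑ v ∈ S \ {u, u + 1}, pvTermU l u v)
      = ∑ v ∈ S \ {u, u + 1}, pvTermU (l.erase u) (u + 1) v := by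
    refine Finset.sum_congr rfl (fun v hv => ?_)
    rcases Finset.mem_sdiff.mp hv with ⟨-, hv2⟩
    simp only [Finset.mem_insert, Finset.mem_singleton, not_or] at hv2
    obtain ⟨hvu, hvu1⟩ := hv2
    unfold pvTermU pvTerm
    rw [if_neg hvu, if_neg hvu1,
      pvCnt_erase hu v, pvCnt_erase hu (v - 1), if_neg hvu, if_neg (by omega : v - 1 ≠ u)]
  have t1 : pvTermU l u u = 1 + max 0 (pvCnt l u - 1 - pvCnt l (u - 1)) := by
    unfold pvTermU; rw [if_pos rfl]
  have t2 : pvTermU l u (u + 1) = max 0 (pvCnt l (u + 1) - pvCnt l u) := by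
    unfold pvTermU pvTerm
    rw [if_neg (by omega : u + 1 ≠ u), (by omega : u + 1 - 1 = u)]
  have t3 : pvTermU (l.erase u) (u + 1) u = max 0 (pvCnt l u - 1 - pvCnt l (u - 1)) := by
    unfold pvTermU pvTerm
    rw [if_neg hne, c1, c3]
  have t4 : pvTermU (l.erase u) (u + 1) (u + 1) = 1 + max 0 (pvCnt l (u + 1) - pvCnt l u) := by
    unfold pvTermU
    rw [if_pos rfl, c2, (by omega : u + 1 - 1 = u), c1]
    congr 2
    ring
  rw [hdiff, Finset.sum_pair hne, Finset.sum_pair hne, t1, t2, t3, t4]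
  ring

-- chain close: closing the chain at u costs exactly one
theorem pvStep2 (S : Finset Int) (l : List Int) (u : Int) (hu : u ∈ l) (h1 : u + 1 ∉ l)
    (hS : u ∈ S) (hS1 : u + 1 ∈ S) :
    (∑ v ∈ S, pvTermU l u v) = 1 + ∑ v ∈ S, pvTerm (l.erase u) v := by
  have hne : u ≠ u + 1 := by omega
  have hcu := pvCnt_pos_of_mem hu
  have hc1 : pvCnt l (u + 1) = 0 := pvCnt_eq_zero_of_not_mem h1
  have c1 : pvCnt (l.erase u) u = pvCnt l u - 1 := by
    rw [pvCnt_erase hu u, if_pos rfl]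
  have c2 : pvCnt (l.erase u) (u + 1) = pvCnt l (u + 1) := by
    rw [pvCnt_erase hu (u + 1), if_neg (by omega : u + 1 ≠ u)]
  have c3 : pvCnt (l.erase u) (u - 1) = pvCnt l (u - 1) := by
    rw [pvCnt_erase hu (u - 1), if_neg (by omega : u - 1 ≠ u)]
  have hsub : ({u, u + 1} : Finset Int) ⊆ S := by
    simp [Finset.insert_subset_iff, hS, hS1]
  rw [← Finset.sum_sdiff hsub, ← Finset.sum_sdiff hsub]
  have hdiff : (∑ v ∈ S \ {u, u + 1}, pvTermU l u v)
      = ∑ v ∈ S \ {u, u + 1}, pvTerm (l.erase u) v := by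
    refine Finset.sum_congr rfl (fun v hv => ?_)
    rcases Finset.mem_sdiff.mp hv with ⟨-, hv2⟩
    simp only [Finset.mem_insert, Finset.mem_singleton, not_or] at hv2
    obtain ⟨hvu, hvu1⟩ := hv2
    unfold pvTermU pvTerm
    rw [if_neg hvu,
      pvCnt_erase hu v, pvCnt_erase hu (v - 1), if_neg hvu, if_neg (by omega : v - 1 ≠ u)]
  have t1 : pvTermU l u u = 1 + max 0 (pvCnt l u - 1 - pvCnt l (u - 1)) := by
    unfold pvTermU; rw [if_pos rfl]
  have t2 : pvTermU l u (u + 1) = 0 := by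
    unfold pvTermU pvTerm
    rw [if_neg (by omega : u + 1 ≠ u), (by omega : u + 1 - 1 = u), hc1]
    exact max_eq_left (by omega)
  have t3 : pvTerm (l.erase u) u = max 0 (pvCnt l u - 1 - pvCnt l (u - 1)) := by
    unfold pvTerm
    rw [c1, c3]
  have t4 : pvTerm (l.erase u) (u + 1) = 0 := by
    unfold pvTerm
    rw [c2, (by omega : u + 1 - 1 = u), c1, hc1]
    exact max_eq_left (by omega)
  rw [hdiff, Finset.sum_pair hne, Finset.sum_pair hne, t1, t2, t3, t4]
  ring

-- opening a chain at the minimum of l is free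
theorem pvStart (S : Finset Int) (l : List Int) (mn : Int) (hm : mn ∈ l)
    (hmin : ∀ y ∈ l, mn ≤ y) :
    (∑ v ∈ S, pvTermU l mn v) = ∑ v ∈ S, pvTerm l v := by
  refine Finset.sum_congr rfl (fun v _ => ?_)
  by_cases h : v = mn
  · subst h
    have hlow : pvCnt l (v - 1) = 0 := by
      apply pvCnt_eq_zero_of_not_mem
      intro hmem
      have := hmin _ hmem
      omega
    have hc := pvCnt_pos_of_mem hm
    unfold pvTermU pvTerm
    rw [if_pos rfl, hlow, sub_zero, sub_zero,
      max_eq_right (by omega : (0:Int) ≤ pvCnt l v - 1),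
      max_eq_right (by omega : (0:Int) ≤ pvCnt l v)]
    ring
  · unfold pvTermU
    rw [if_neg h]

-- closing the current chain and restarting at the minimum of the remainder costs exactly one
theorem pvClose (S : Finset Int) (l : List Int) (u mn' : Int) (hu : u ∈ l) (h1 : u + 1 ∉ l)
    (hS : u ∈ S) (hS1 : u + 1 ∈ S)
    (hmn' : PySem.List.min? (l.erase u) (fun y => y) = some mn') :
    (∑ v ∈ S, pvTermU l u v) = 1 + ∑ v ∈ S, pvTermU (l.erase u) mn' v := by
  rw [pvStep2 S l u hu h1 hS hS1,
    pvStart S (l.erase u) mn' (PySem.List.min?_mem hmn') (PySem.List.min?_isMin hmn')]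

-- the loop invariant: from any state (l, u) with u ∈ l the loop returns count + Σ pvTermU
theorem pvGoA_eq (S : Finset Int) :
    ∀ (n : Nat) (l : List Int), l.length = n → ∀ (u c0 : Int), u ∈ l →
    (∀ x ∈ l, x ∈ S ∧ x + 1 ∈ S) →
    pvGoA l c0 u = some (c0 + ∑ v ∈ S, pvTermU l u v) := by
  intro n
  induction n using Nat.strong_induction_on with
  | _ n ih =>
    intro l hl u c0 hu hSl
    have hlne : l ≠ [] := by rintro rfl; simp at hu
    have hrem : PySem.List.remove? l u = some (l.erase u) :=
      PySem.List.remove?_eq_some_erase l u hu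
    have hlen : (l.erase u).length < n := hl ▸ pvRemoveLen hrem
    obtain ⟨hSu, hSu1⟩ := hSl u hu
    have hSl' : ∀ x ∈ l.erase u, x ∈ S ∧ x + 1 ∈ S :=
      fun x hx => hSl x (List.mem_of_mem_erase hx)
    rw [pvGoA, if_neg hlne]
    by_cases hmem : (u + 1) ∈ l
    · rw [if_pos hmem]
      split
      · next heq => rw [hrem] at heq; cases heq
      · next l2 heq =>
          rw [hrem] at heq
          injection heq with h2
          subst h2
          have hu' : u + 1 ∈ l.erase u := List.mem_erase_of_ne (by omega) |>.mpr hmem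
          rw [ih _ hlen (l.erase u) rfl (u + 1) c0 hu' hSl',
            pvStep1 S l u hu hSu hSu1]
    · rw [if_neg hmem]
      split
      · next heq => exact absurd ((PySem.List.min?_eq_none_iff l _).mp heq) hlne
      · next mn hmn =>
          have hmnmem : mn ∈ l := PySem.List.min?_mem hmn
          by_cases hne : u ≠ mn
          · rw [if_pos hne]
            split
            · next heq => rw [hrem] at heq; cases heq
            · next l2 heq =>
                rw [hrem] at heq
                injection heq with h2
                subst h2
                have hmn' : mn ∈ l.erase u :=
                  List.mem_erase_of_ne (fun h => hne h.symm) |>.mpr hmnmem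
                split
                · next heq2 =>
                    exact absurd ((PySem.List.min?_eq_none_iff _ _).mp heq2)
                      (List.ne_nil_of_mem hmn')
                · next mn2 hmn2 =>
                    rw [ih _ hlen (l.erase u) rfl mn2 (c0 + 1) (PySem.List.min?_mem hmn2) hSl',
                      pvClose S l u mn2 hu hmem hSu hSu1 hmn2]
                    congr 1
                    ring
          · rw [if_neg hne]
            split
            · next heq => rw [hrem] at heq; cases heq
            · next l2 heq =>
                rw [hrem] at heq
                injection heq with h2
                subst h2
                by_cases hnil : l.erase u = []
                · rw [if_pos hnil]
                  have hl1 : l = [u] := by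
                    have h1 : (l.erase u).length = l.length - 1 := List.length_erase_of_mem hu
                    have h2 : 0 < l.length := List.length_pos_of_mem hu
                    have h3 : l.length = 1 := by
                      rw [hnil] at h1; simp at h1; omega
                    obtain ⟨a, ha⟩ := List.length_eq_one_iff.mp h3
                    subst ha
                    simp at hu
                    rw [hu]
                  subst hl1
                  have hsum : (∑ v ∈ S, pvTermU [u] u v) = 1 := by
                    rw [Finset.sum_eq_single_of_mem u hSu]
                    · have hc : pvCnt [u] u = 1 := by simp [pvCnt]
                      have hc' : pvCnt [u] (u - 1) = 0 :=
                        pvCnt_eq_zero_of_not_mem (by simp)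
                      unfold pvTermU
                      rw [if_pos rfl, hc, hc']
                      norm_num
                    · intro v _ hv
                      have hc : pvCnt [u] v = 0 :=
                        pvCnt_eq_zero_of_not_mem (by simp [hv])
                      unfold pvTermU pvTerm
                      rw [if_neg hv, hc]
                      exact max_eq_left (by have := pvCnt_nonneg [u] (v - 1); omega)
                  rw [hsum]
                · rw [if_neg hnil]
                  split
                  · next heq2 => exact absurd ((PySem.List.min?_eq_none_iff _ _).mp heq2) hnil
                  · next mn2 hmn2 =>
                      rw [ih _ hlen (l.erase u) rfl mn2 (c0 + 1) (PySem.List.min?_mem hmn2) hSl',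
                        pvClose S l u mn2 hu hmem hSu hSu1 hmn2]
                      congr 1
                      ring

theorem pvAlt_eq (L : List Int) :
    min_no_of_turns_alt L = ((PySem.Set.ofList L).map (fun k => pvTerm L k)).sum := by
  simp only [min_no_of_turns_alt, ← PySem.Dict.counter_eq_foldl]
  rw [PySem.Dict.items_counter, List.map_map]
  refine congrArg List.sum (List.map_congr_left ?_)
  intro k _
  simp [Function.comp, PySem.Dict.getD_counter, pvTerm, pvCnt]

theorem pvSum_eq (S : Finset Int) (L : List Int) (hS : ∀ x ∈ L, x ∈ S) :
    (∑ v ∈ S, pvTerm L v) = ((PySem.Set.ofList L).map (fun k => pvTerm L k)).sum := by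
  have hnd := PySem.Set.nodup_ofList L
  rw [← List.sum_toFinset _ hnd]
  refine (Finset.sum_subset ?_ ?_).symm
  · intro v hv
    rw [List.mem_toFinset, PySem.Set.mem_ofList] at hv
    exact hS v hv
  · intro v _ hv
    rw [List.mem_toFinset, PySem.Set.mem_ofList] at hv
    have hc : pvCnt L v = 0 := pvCnt_eq_zero_of_not_mem hv
    unfold pvTerm
    rw [hc]
    exact max_eq_left (by have := pvCnt_nonneg L (v - 1); omega)

-- ===== VERDICT (by name: the statement is the Claim_ definition above) =====
theorem min_no_of_turns_spec : Claim_equal_min_no_of_turns := by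
  intro L _ hpre
  unfold Spec_min_no_of_turns min_no_of_turns
  split
  · next heq => exact absurd ((PySem.List.min?_eq_none_iff L _).mp heq) hpre
  · next m hmn =>
    have hmem : m ∈ L := PySem.List.min?_mem hmn
    have hmin : ∀ y ∈ L, m ≤ y := PySem.List.min?_isMin hmn
    set S : Finset Int := L.toFinset ∪ L.toFinset.image (· + 1)
    have hS : ∀ x ∈ L, x ∈ S ∧ x + 1 ∈ S := by
      intro x hx
      constructor
      · exact Finset.mem_union_left _ (List.mem_toFinset.mpr hx)
      · exact Finset.mem_union_right _ (Finset.mem_image.mpr ⟨x, List.mem_toFinset.mpr hx, rfl⟩)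
    rw [pvGoA_eq S L.length L rfl m 0 hmem hS]
    simp only [Option.getD_some]
    rw [pvStart S L m hmem hmin, pvSum_eq S L (fun x hx => (hS x hx).1), ← pvAlt_eq]
    ring
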